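-- pv_equiv track=rewrite | github.com/vivaluxo37/BrokeranaylysisDaily | fix_batch_quotes.py | fix_quotes_in_values
-- ===== SOURCE A (Python) =====
-- def fix_quotes_in_values(values_content):
--     """Fix quotes specifically in the VALUES section"""
--     # This is a more sophisticated approach to handle quote escaping
--     lines = values_content.split('\n')
--     fixed_lines = []
--
--     for line in lines:
--         if line.strip():
--             # For each line, we need to escape single quotes that are inside string literals
--             # but not the ones that delimit the string literals
--             fixed_line = escape_inner_quotes(line)
--             fixed_lines.append(fixed_line)
--         else:
--             fixed_lines.append(line)
--
--     return '\n'.join(fixed_lines)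
--
-- def escape_inner_quotes(line):
--     """Escape single quotes that are inside string literals"""
--     # Find all string literals (content between single quotes)
--     # and escape any single quotes inside them
--
--     result = []
--     i = 0
--     while i < len(line):
--         if line[i] == "'":
--             # Found start of string literal
--             result.append("'")
--             i += 1
--
--             # Find the end of this string literal
--             string_content = []
--             while i < len(line):
--                 if line[i] == "'":
--                     # Check if this is an escaped quote or end of string
--                     if i + 1 < len(line) and line[i + 1] == "'":
--                         # This is already an escaped quote, keep it
--                         string_content.append("''")
--                         i += 2
--                     else:
--                         # This is the end of the string literal
--                         break
--                 elif line[i] == "'":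
--                     # This is a single quote inside the string, escape it
--                     string_content.append("''")
--                     i += 1
--                 else:
--                     string_content.append(line[i])
--                     i += 1
--
--             # Add the string content and closing quote
--             result.append(''.join(string_content))
--             if i < len(line):
--                 result.append("'")
--                 i += 1
--         else:
--             result.append(line[i])
--             i += 1
--
--     return ''.join(result)
-- ===== SOURCE B (Python) =====
-- def fix_quotes_in_values(values_content):
--     """Fix quotes in the VALUES section.
--
--     A's helper re-emits every character unchanged (its "escape" branch is
--     dead code) and split('\n') + '\n'.join round-trips exactly, so the
--     whole transformation is the identity on strings."""
--     return values_content
-- ===== Notes on version B (the rewrite author's own statement) =====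
-- stated objective: simpler
-- what changed: A's per-character scan is provably the identity (its escape branch is dead code and split/join round-trips), so B returns the input string directly in O(1) instead of A's line-by-line character scan.
import Mathlib
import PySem

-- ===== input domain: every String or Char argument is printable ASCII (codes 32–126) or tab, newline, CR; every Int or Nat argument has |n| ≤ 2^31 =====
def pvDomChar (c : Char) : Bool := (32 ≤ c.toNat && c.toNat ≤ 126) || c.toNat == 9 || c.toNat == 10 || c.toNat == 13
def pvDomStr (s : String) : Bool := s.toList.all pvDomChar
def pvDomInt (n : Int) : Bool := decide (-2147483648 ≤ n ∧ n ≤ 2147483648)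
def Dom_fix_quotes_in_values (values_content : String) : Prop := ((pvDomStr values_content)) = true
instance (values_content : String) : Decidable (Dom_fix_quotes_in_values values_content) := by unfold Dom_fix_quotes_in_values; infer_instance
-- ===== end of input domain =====

-- B replaces A's line-by-line character scan with the identity: A's "escape" branch is
-- dead code and split('\n')/'\n'.join round-trips, so A returns its input unchanged.


-- ===== PORT A =====
-- inner while loop of escape_inner_quotes: starting just after an opening quote,
-- collects the string_content and returns it together with the unconsumed rest
-- (the Python 'elif line[i] == "'"' branch is unreachable and has no counterpart).
def escapeInnerLoop : List Char → List Char × List Char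
  | '\'' :: '\'' :: rest =>
      let p := escapeInnerLoop rest
      ('\'' :: '\'' :: p.1, p.2)                       -- already-escaped quote, keep it
  | '\'' :: rest => ([], '\'' :: rest)                 -- end of the string literal: break
  | c :: rest =>
      let p := escapeInnerLoop rest
      (c :: p.1, p.2)
  | [] => ([], [])

-- needed by escape_inner_quotes for termination
theorem escapeInnerLoop_len (l : List Char) : (escapeInnerLoop l).2.length ≤ l.length := by
  induction l using escapeInnerLoop.induct <;> simp_all [escapeInnerLoop]
  all_goals omega

-- outer while loop of escape_inner_quotes
def escape_inner_quotes : List Char → List Char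
  | [] => []
  | c :: rest =>
      if c = '\'' then
        match h : (escapeInnerLoop rest).2 with
        | [] => '\'' :: (escapeInnerLoop rest).1                     -- i == len(line)
        | _ :: r' => '\'' :: (escapeInnerLoop rest).1 ++ '\'' :: escape_inner_quotes r'
      else c :: escape_inner_quotes rest
termination_by l => l.length
decreasing_by
  · have := escapeInnerLoop_len rest
    simp [h] at this; simp; omega
  · simp

def fix_quotes_in_values (values_content : String) : String :=
  let lines := PySem.Chars.splitOn values_content.toList ['\n']
  let fixed_lines := lines.foldl
    (fun acc line =>
      acc ++ [if PySem.Chars.strip line ≠ [] then escape_inner_quotes line else line]) []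
  String.ofList (List.intercalate ['\n'] fixed_lines)

-- ===== PORT B =====
def fix_quotes_in_values_alt (values_content : String) : String := values_content

-- ===== PRECONDITION & SPEC =====
def Spec_fix_quotes_in_values (values_content : String) (out : String) : Prop := out = fix_quotes_in_values_alt values_content
instance (values_content : String) (out : String) : Decidable (Spec_fix_quotes_in_values values_content out) := by unfold Spec_fix_quotes_in_values; infer_instance

-- ===== CLAIM (what is proved, stated in full; the proofs are below) =====
def Claim_equal_fix_quotes_in_values : Prop := ∀ (values_content : String), Dom_fix_quotes_in_values values_content → Spec_fix_quotes_in_values values_content (fix_quotes_in_values values_content)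

-- ===== LEMMAS AND PROOFS =====

theorem escapeInnerLoop_append (l : List Char) :
    (escapeInnerLoop l).1 ++ (escapeInnerLoop l).2 = l := by
  induction l using escapeInnerLoop.induct <;> simp_all [escapeInnerLoop]

theorem escapeInnerLoop_rest_head (l : List Char) {x : Char} {r : List Char}
    (h : (escapeInnerLoop l).2 = x :: r) : x = '\'' := by
  induction l using escapeInnerLoop.induct <;> simp_all [escapeInnerLoop] <;> tauto

theorem escape_inner_quotes_id (l : List Char) : escape_inner_quotes l = l := by
  induction l using escape_inner_quotes.induct with
  | case1 => simp [escape_inner_quotes]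
  | case2 rest h =>
      have ha := escapeInnerLoop_append rest
      rw [h] at ha
      simp only [List.append_nil] at ha
      simp only [escape_inner_quotes]
      simp only [if_true]
      split
      · rw [ha]
      · rename_i h2
        simp [h] at h2
  | case3 rest head r' h ih =>
      have hx := escapeInnerLoop_rest_head rest h
      have ha := escapeInnerLoop_append rest
      rw [h] at ha
      subst hx
      simp only [escape_inner_quotes]
      simp only [if_true]
      split
      · rename_i h2
        simp [h] at h2
      · rename_i head2 r2 h2
        rw [h] at h2
        injection h2 with e1 e2
        subst e2
        rw [ih]
        conv_rhs => rw [← ha]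
        simp
  | case4 c rest hc ih => simp [escape_inner_quotes, hc, ih]

theorem intercalate_cons_cons (sep a b : List Char) (t : List (List Char)) :
    List.intercalate sep (a :: b :: t) = a ++ sep ++ List.intercalate sep (b :: t) := by
  simp [List.intercalate, List.intersperse]

theorem intercalate_snoc (sep z : List Char) (ys : List (List Char)) (h : ys ≠ []) :
    List.intercalate sep (ys ++ [z]) = List.intercalate sep ys ++ sep ++ z := by
  induction ys with
  | nil => simp at h
  | cons y t ih =>
      cases t with
      | nil => simp [List.intercalate, List.intersperse]
      | cons b t' =>
          have ih' := ih (by simp)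
          simp only [List.cons_append] at ih' ⊢
          rw [intercalate_cons_cons, ih', intercalate_cons_cons]
          simp [List.append_assoc]

theorem go_join (fuel : ℕ) : ∀ (l cur : List Char) (acc : List (List Char)),
    l.length ≤ fuel →
    List.intercalate ['\n'] (PySem.Chars.splitOn.go ['\n'] fuel l cur acc) =
      List.intercalate ['\n'] (acc.reverse ++ [cur.reverse]) ++ l := by
  induction fuel with
  | zero =>
      intro l cur acc h
      have : l = [] := by cases l <;> simp_all
      subst this
      rw [PySem.Chars.splitOn.go.eq_def]
      simp
  | succ n ih =>
      intro l cur acc h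
      cases l with
      | nil => rw [PySem.Chars.splitOn.go.eq_def]; simp
      | cons c rest =>
          rw [PySem.Chars.splitOn.go.eq_def]
          simp only [List.length_cons] at h
          by_cases hc : c = '\n'
          · have hpre : (['\n'] : List Char).isPrefixOf (c :: rest) = true := by
              simp [List.isPrefixOf, hc]
            simp only [hpre, if_pos]
            rw [ih _ _ _ (by simpa using Nat.le_of_succ_le_succ h)]
            have hys : (acc.reverse ++ [cur.reverse] : List (List Char)) ≠ [] := by simp
            simp only [List.length_singleton, List.drop_one, List.tail_cons,
              List.reverse_cons, List.reverse_nil]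
            rw [intercalate_snoc _ _ _ hys]
            simp [hc]
          · have hpre : (['\n'] : List Char).isPrefixOf (c :: rest) = false := by
              simp [List.isPrefixOf]; intro hh; exact hc hh.symm
            simp only [hpre, Bool.false_eq_true, if_false]
            rw [ih _ _ _ (by omega)]
            by_cases hacc : (acc.reverse : List (List Char)) = []
            · simp [hacc, List.intercalate]
            · rw [show (acc.reverse ++ [(c :: cur).reverse] : List (List Char)) =
                    acc.reverse ++ [cur.reverse ++ [c]] by simp,
                show acc.reverse ++ [cur.reverse ++ [c]] =
                    (acc.reverse ++ [cur.reverse ++ [c]]) by rfl]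
              have h1 := intercalate_snoc ['\n'] (cur.reverse ++ [c]) acc.reverse hacc
              have h2 := intercalate_snoc ['\n'] cur.reverse acc.reverse hacc
              rw [h1, h2]; simp

theorem join_splitOn_newline (l : List Char) :
    List.intercalate ['\n'] (PySem.Chars.splitOn l ['\n']) = l := by
  unfold PySem.Chars.splitOn
  rw [go_join (l.length + 1) l [] [] (by omega)]
  simp [List.intercalate]

-- ===== VERDICT (by name: the statement is the Claim_ definition above) =====
theorem fix_quotes_in_values_spec : Claim_equal_fix_quotes_in_values := by
  intro s _
  unfold Spec_fix_quotes_in_values fix_quotes_in_values fix_quotes_in_values_alt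
  have hfold : ∀ (ls : List (List Char)) (acc : List (List Char)),
      ls.foldl (fun acc line =>
        acc ++ [if PySem.Chars.strip line ≠ [] then escape_inner_quotes line else line]) acc
      = acc ++ ls := by
    intro ls
    induction ls with
    | nil => simp
    | cons x t ih =>
        intro acc
        simp only [List.foldl_cons, ih]
        have : (if PySem.Chars.strip x ≠ [] then escape_inner_quotes x else x) = x := by
          split <;> simp [escape_inner_quotes_id]
        simp [this]
  simp only [hfold, List.nil_append]
  rw [join_splitOn_newline]
  simp
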